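-- pv_equiv track=rewrite | github.com/ilellosmith/python_practice | edX/intro_python/final/uniqueValues.py | uniqueValues
-- ===== SOURCE A (Python) =====
-- def uniqueValues(aDict):
--     '''
--     aDict: a dictionary
--     returns: a sorted list of keys that map to unique aDict values, empty list if none
--     '''
--
--     unique_keys = []
--
--     # if empty dict, return empty list
--     if len(aDict) == 0:
--         return unique_keys
--
--     # build a frequency dictionary for values in aDict
--     values = list(aDict.values())
--
--     # for each value, count up frequency in values list
--     freq_dict = {}
--     values_copy = values[:] # copy of values to iterate over
--     for search_value in values_copy:
--         count = 0
--         # count frequency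
--         for value in values:
--             if search_value == value:
--                 count += 1
--         freq_dict.setdefault(count, []).append(search_value) # add to frequency dictionary
--         values = [x for x in values if x != search_value] # remove all instances from dict if found
--
--     # then, search for unique values in each key in aDict. If key is a unique value, add key to list of unique keys
--
--     unique_values = freq_dict.get(1, [])
--
--     for key in list(aDict.keys()):
--         if aDict[key] in unique_values:
--             unique_keys.append(key)
--
--     unique_keys.sort()
--     return unique_keys
-- ===== SOURCE B (Python) =====
-- def uniqueValues(aDict):
--     '''
--     aDict: a dictionary
--     returns: a sorted list of keys that map to unique aDict values, empty list if none
--     '''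
--     freq = {}
--     for v in aDict.values():
--         freq[v] = freq.get(v, 0) + 1
--     return sorted(k for k, v in aDict.items() if freq[v] == 1)
-- ===== Notes on version B (the rewrite author's own statement) =====
-- stated objective: faster
-- what changed: Replaces A's destructive-removal pass that builds a dict from occurrence-count to value lists plus a separate membership-test key loop and in-place sort by a single value-frequency dict built in one pass and a sorted filter over the items.
import Mathlib
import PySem

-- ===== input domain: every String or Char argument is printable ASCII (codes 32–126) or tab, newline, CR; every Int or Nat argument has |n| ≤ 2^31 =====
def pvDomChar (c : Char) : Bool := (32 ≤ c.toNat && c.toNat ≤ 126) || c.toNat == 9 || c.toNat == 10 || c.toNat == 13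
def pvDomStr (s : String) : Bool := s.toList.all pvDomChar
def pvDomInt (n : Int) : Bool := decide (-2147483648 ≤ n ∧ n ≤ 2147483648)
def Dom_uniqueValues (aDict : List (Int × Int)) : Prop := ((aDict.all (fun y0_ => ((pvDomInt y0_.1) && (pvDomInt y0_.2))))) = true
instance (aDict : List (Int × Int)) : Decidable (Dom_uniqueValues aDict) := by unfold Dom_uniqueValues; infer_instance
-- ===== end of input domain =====

-- B replaces A's destructive-removal frequency pass (a dict from occurrence-count to value lists)
-- and its separate key-selection loop by one counting pass over the values and a sorted filter (faster).


-- ===== PORT A =====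
-- literal port of A; the association list is first materialised as a Python dict (insertion/overwrite)
def uniqueValues (aDict : List (Int × Int)) : List Int :=
  let d := PySem.Dict.ofList aDict
  let unique_keys : List Int := []
  if d.size = 0 then unique_keys
  else
    let values := d.values
    -- for search_value in values_copy: count occurrences, record in freq_dict, strip from values
    let st := values.foldl
      (fun (st : List Int × PySem.Dict Int (List Int)) search_value =>
        (st.1.filter (fun y => !(y == search_value)),
         st.2.modify (st.1.foldl (fun c v => if search_value == v then c + 1 else c) (0:Int))
           [] (· ++ [search_value])))
      (values, PySem.Dict.empty)
    let unique_values := st.2.getD 1 []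
    -- aDict[key]: key ∈ d.keys, so getD is exact here (no KeyError possible)
    let unique_keys := d.keys.foldl
      (fun acc key => if unique_values.contains (d.getD key 0) then acc ++ [key] else acc)
      unique_keys
    PySem.List.sorted unique_keys (fun x => x) false

-- ===== PORT B =====
def uniqueValues_alt (aDict : List (Int × Int)) : List Int :=
  let d := PySem.Dict.ofList aDict
  let freq := d.values.foldl (fun f v => f.insert v (f.getD v 0 + 1))
    (PySem.Dict.empty : PySem.Dict Int Int)
  PySem.List.sorted
    ((d.items.filter (fun p => freq.getD p.2 0 == 1)).map Prod.fst)
    (fun x => x) false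

-- ===== PRECONDITION & SPEC =====
def Spec_uniqueValues (aDict : List (Int × Int)) (out : List Int) : Prop := out = uniqueValues_alt aDict
instance (aDict : List (Int × Int)) (out : List Int) : Decidable (Spec_uniqueValues aDict out) := by unfold Spec_uniqueValues; infer_instance

-- ===== CLAIM (what is proved, stated in full; the proofs are below) =====
def Claim_equal_uniqueValues : Prop := ∀ (aDict : List (Int × Int)), Dom_uniqueValues aDict → Spec_uniqueValues aDict (uniqueValues aDict)

-- ===== LEMMAS AND PROOFS =====

-- Invariant of A's frequency loop: a value lands in freq_dict[1] exactly when it is still in the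
-- remaining input and occurs exactly once in the current (stripped) values list.
lemma freq_getD_one_mem (l : List Int) : ∀ (vals : List Int) (f : PySem.Dict Int (List Int)) (w : Int),
    w ∈ ((l.foldl
      (fun (st : List Int × PySem.Dict Int (List Int)) x =>
        (st.1.filter (fun y => !(y == x)),
         st.2.modify (st.1.foldl (fun c v => if x == v then c + 1 else c) (0:Int)) [] (· ++ [x])))
      (vals, f)).2.getD 1 []) ↔
      w ∈ f.getD 1 [] ∨ (w ∈ l ∧ vals.count w = 1) := by
  induction l with
  | nil => simp
  | cons x t ih =>
    intro vals f w
    simp only [List.foldl_cons]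
    rw [ih]
    rw [PySem.List.foldl_count_if (fun v => x == v) vals 0]
    have hcnt : vals.countP (fun v => x == v) = vals.count x := by
      unfold List.count; exact List.countP_congr (fun a _ => by rw [Bool.beq_comm])
    rw [hcnt, zero_add]
    rw [PySem.Dict.getD_modify]
    have hfc : (vals.filter (fun y => !(y == x))).count w =
        if w = x then 0 else vals.count w := by
      by_cases hw : w = x
      · subst hw; simp [List.count_eq_zero_of_not_mem, List.mem_filter]
      · simp only [hw, if_false]
        rw [List.count_filter]
        simp [hw]
    rw [hfc]
    by_cases hw : w = x
    · subst hw
      by_cases hc : vals.count w = 1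
      · simp [hc]
      · have : ((1:Int) = (vals.count w : Int)) ↔ False := by
          constructor
          · intro h; exact hc (by exact_mod_cast h.symm)
          · intro h; exact h.elim
        simp [this, hc]
    · by_cases hc : (1:Int) = (vals.count x : Int)
      · simp [← hc, hw]
      · simp [hc, hw]

lemma mem_getD_of_mem_keys (d : PySem.Dict Int Int) (hnd : d.keys.Nodup) (k : Int)
    (hk : k ∈ d.keys) : d.getD k 0 ∈ d.values := by
  rw [PySem.Dict.values_eq_map_keys d hnd 0]
  exact List.mem_map_of_mem hk

-- ===== VERDICT (by name: the statement is the Claim_ definition above) =====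
theorem uniqueValues_spec : Claim_equal_uniqueValues := by
  intro aDict _
  unfold Spec_uniqueValues uniqueValues uniqueValues_alt
  simp only []
  set d := PySem.Dict.ofList aDict with hd
  have hnd : d.keys.Nodup := PySem.Dict.nodup_keys_ofList aDict
  by_cases hz : d.size = 0
  · -- empty dict: keys are empty, so B also returns []
    have hitems : d.items = [] := List.length_eq_zero_iff.mp hz
    simp [hz, hitems, PySem.List.sorted_eq_nil_iff]
  · simp only [hz, if_false]
    rw [PySem.List.foldl_append_if_eq_filter]
    simp only [List.nil_append]
    rw [PySem.Dict.items_eq_map_keys d hnd 0, List.filter_map, List.map_map]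
    have hid : (Prod.fst ∘ fun k => (k, d.getD k 0)) = id := rfl
    rw [hid, List.map_id]
    congr 1
    apply List.filter_congr
    intro k hk
    simp only [Function.comp_apply]
    have hw : d.getD k 0 ∈ d.values := mem_getD_of_mem_keys d hnd k hk
    have hm := freq_getD_one_mem d.values d.values PySem.Dict.empty (d.getD k 0)
    simp only [PySem.Dict.getD_empty, List.not_mem_nil, false_or] at hm
    have hmem := hm.trans (and_iff_right hw)
    rw [Bool.eq_iff_iff, List.contains_iff_mem, beq_iff_eq]
    rw [PySem.Dict.getD_foldl_insert_add_one, PySem.Dict.getD_empty, zero_add]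
    rw [hmem]
    omega
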